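-- pv_equiv track=rewrite | github.com/aeizaguerri/obsidian-assintant-rag | app/src/advanced_chunking.py | get_parent_headers
-- ===== SOURCE A (Python) =====
-- from typing import List, Dict, Tuple, Optional
--
-- def get_parent_headers(headers: List[Tuple[int, str, int]], position: int) -> List[str]:
--     """Get parent headers for a given position in the document"""
--     parent_headers = []
--     current_levels = {}
--
--     for level, text, header_pos in headers:
--         if header_pos <= position:
--             # Update the hierarchy
--             current_levels[level] = text
--             # Remove deeper levels
--             current_levels = {k: v for k, v in current_levels.items() if k <= level}
--         else:
--             break
--
--     # Return headers in hierarchical order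
--     return [current_levels[level] for level in sorted(current_levels.keys())]
-- ===== SOURCE B (Python) =====
-- def get_parent_headers(headers, position):
--     """Get parent headers for a given position in the document"""
--     stack = []  # (level, text) pairs, strictly increasing in level
--     for level, text, header_pos in headers:
--         if header_pos > position:
--             break
--         while stack and stack[-1][0] >= level:
--             stack.pop()
--         stack.append((level, text))
--     return [text for _, text in stack]
-- ===== Notes on version B (the rewrite author's own statement) =====
-- stated objective: simpler
-- what changed: Replaces the level-keyed dict with rebuild-by-comprehension and a final sort by an explicit monotone stack: pop entries of level >= current, push, and read the texts off directly with no sort.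
import Mathlib
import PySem

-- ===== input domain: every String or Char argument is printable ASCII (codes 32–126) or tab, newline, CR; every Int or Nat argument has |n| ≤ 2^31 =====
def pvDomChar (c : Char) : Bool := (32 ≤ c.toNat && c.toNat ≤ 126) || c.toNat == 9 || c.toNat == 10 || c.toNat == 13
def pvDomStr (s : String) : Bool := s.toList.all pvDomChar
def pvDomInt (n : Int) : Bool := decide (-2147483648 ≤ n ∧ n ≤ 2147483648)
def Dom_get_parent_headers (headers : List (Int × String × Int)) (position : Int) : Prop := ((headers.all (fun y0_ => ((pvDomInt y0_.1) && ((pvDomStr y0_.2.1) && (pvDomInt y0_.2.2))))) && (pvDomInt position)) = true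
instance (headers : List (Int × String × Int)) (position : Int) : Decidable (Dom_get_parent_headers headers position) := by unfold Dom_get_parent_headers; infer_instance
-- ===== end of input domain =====

-- B replaces A's level-keyed dict (rebuilt by a filtering comprehension each step, then sorted at the
-- end) by an explicit monotone stack: pop entries of level ≥ the current header's level, push, and
-- read the texts off directly with no final sort. Objective: simpler.

-- ===== PORT A =====
-- the for-loop with break; the dict comprehension is the loop re-inserting the kept items
def pvALoop (position : Int) : List (Int × String × Int) → PySem.Dict Int String → PySem.Dict Int String
  | [], d => d
  | (level, text, header_pos) :: rest, d =>
    if header_pos ≤ position then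
      pvALoop position rest
        (((d.insert level text).items.filter (fun p => decide (p.1 ≤ level))).foldl
          (fun d' p => d'.insert p.1 p.2) PySem.Dict.empty)
    else d

def get_parent_headers (headers : List (Int × String × Int)) (position : Int) : List String :=
  let d := pvALoop position headers PySem.Dict.empty
  (PySem.List.sorted d.keys (fun k => k) false).map (fun level => d.getD level "")

-- ===== PORT B =====
-- the inner while loop: pop from the end while the top's level is ≥ the current one
def pvPopGE (level : Int) (st : List (Int × String)) : List (Int × String) :=
  match h : st.getLast? with
  | none => st
  | some p => if level ≤ p.1 then pvPopGE level st.dropLast else st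
termination_by st.length
decreasing_by
  have hne : st ≠ [] := by
    intro hnil; rw [hnil] at h; simp at h
  have := List.length_pos_iff.mpr hne
  simp [List.length_dropLast]; omega

def pvBLoop (position : Int) : List (Int × String × Int) → List (Int × String) → List (Int × String)
  | [], st => st
  | (level, text, header_pos) :: rest, st =>
    if header_pos > position then st
    else pvBLoop position rest (pvPopGE level st ++ [(level, text)])

def get_parent_headers_alt (headers : List (Int × String × Int)) (position : Int) : List String :=
  (pvBLoop position headers []).map (fun p => p.2)

-- ===== PRECONDITION & SPEC =====
def Spec_get_parent_headers (headers : List (Int × String × Int)) (position : Int) (out : List String) : Prop := out = get_parent_headers_alt headers position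
instance (headers : List (Int × String × Int)) (position : Int) (out : List String) : Decidable (Spec_get_parent_headers headers position out) := by unfold Spec_get_parent_headers; infer_instance

-- ===== CLAIM (what is proved, stated in full; the proofs are below) =====
def Claim_equal_get_parent_headers : Prop := ∀ (headers : List (Int × String × Int)) (position : Int), Dom_get_parent_headers headers position → Spec_get_parent_headers headers position (get_parent_headers headers position)

-- ===== LEMMAS AND PROOFS =====

-- the strictly-increasing-by-level invariant of both states
def pvInc (st : List (Int × String)) : Prop := st.Pairwise (fun a b => a.1 < b.1)

-- the while loop pops exactly the trailing block of levels ≥ `level`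
lemma pvPopGE_of_split (level : Int) (pre suf : List (Int × String))
    (hpre : ∀ p ∈ pre, p.1 < level) (hsuf : ∀ p ∈ suf, level ≤ p.1) :
    pvPopGE level (pre ++ suf) = pre := by
  induction suf using List.reverseRecOn with
  | nil =>
    simp only [List.append_nil]
    rw [pvPopGE]
    split
    · rfl
    · next p hl =>
        have hlt := hpre p (List.mem_of_getLast? hl)
        rw [if_neg (not_le.mpr hlt)]
  | append_singleton s q ih =>
    have hq : level ≤ q.1 := hsuf q (by simp)
    rw [show pre ++ (s ++ [q]) = (pre ++ s) ++ [q] by simp]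
    rw [pvPopGE]
    split
    · next hl => simp at hl
    · next p hl =>
        rw [List.getLast?_concat] at hl
        obtain rfl : q = p := by injection hl
        rw [if_pos hq, List.dropLast_concat]
        exact ih (fun p hp => hsuf p (by simp [hp]))

-- a strictly increasing list splits at `level`
lemma pvSplit (level : Int) : ∀ st : List (Int × String), pvInc st →
    ∃ pre suf, st = pre ++ suf ∧ (∀ p ∈ pre, p.1 < level) ∧ (∀ p ∈ suf, level ≤ p.1) := by
  intro st h
  induction st with
  | nil => exact ⟨[], [], rfl, by simp, by simp⟩
  | cons p st ih =>
    rw [pvInc, List.pairwise_cons] at h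
    obtain ⟨h1, h2⟩ := h
    by_cases hp : p.1 < level
    · obtain ⟨pre, suf, heq, hpre, hsuf⟩ := ih h2
      exact ⟨p :: pre, suf, by simp [heq], by
        intro q hq; rcases List.mem_cons.mp hq with rfl | hq
        · exact hp
        · exact hpre q hq, hsuf⟩
    · refine ⟨[], p :: st, rfl, by simp, ?_⟩
      intro q hq
      rcases List.mem_cons.mp hq with rfl | hq
      · omega
      · have := h1 q hq; omega

-- one step of A's loop body, computed on the items list, equals one step of B's
lemma pvStep (st : List (Int × String)) (level : Int) (text : String) (h : pvInc st) :
    ((((PySem.Dict.mk st).insert level text).items.filter (fun p => decide (p.1 ≤ level))).foldl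
        (fun d' p => d'.insert p.1 p.2) PySem.Dict.empty).items
      = pvPopGE level st ++ [(level, text)] ∧
    pvInc (pvPopGE level st ++ [(level, text)]) := by
  obtain ⟨pre, suf, rfl, hpre, hsuf⟩ := pvSplit level st h
  have hpop : pvPopGE level (pre ++ suf) = pre := pvPopGE_of_split level pre suf hpre hsuf
  have hPW : (pre ++ suf).Pairwise (fun a b => a.1 < b.1) := h
  have hprePW : pre.Pairwise (fun a b => a.1 < b.1) := (List.pairwise_append.mp hPW).1
  have hresPW : pvInc (pre ++ [(level, text)]) := by
    rw [pvInc, List.pairwise_append]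
    exact ⟨hprePW, by simp, by intro a ha b hb; simp at hb; subst hb; exact hpre a ha⟩
  rw [hpop]
  refine ⟨?_, hresPW⟩
  have hkeep : ∀ a ∈ pre, decide (a.1 ≤ level) = true := by
    intro a ha; simp only [decide_eq_true_eq]; exact le_of_lt (hpre a ha)
  -- the filtered items list
  have hfilter : (((PySem.Dict.mk (pre ++ suf)).insert level text).items.filter
      (fun p => decide (p.1 ≤ level))) = pre ++ [(level, text)] := by
    have hitems : (PySem.Dict.mk (pre ++ suf)).items = pre ++ suf := rfl
    rw [PySem.Dict.items_insert, hitems]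
    by_cases hc : (PySem.Dict.mk (pre ++ suf)).contains level
    · -- `level` is already a key: it is the head of `suf`
      rw [if_pos hc]
      have hmem : level ∈ (pre ++ suf).map (fun p => p.1) := by
        have := (PySem.Dict.contains_iff_mem_keys _ _).mp hc
        simpa [PySem.Dict.keys, hitems] using this
      obtain ⟨q, hq, hq1⟩ := List.mem_map.mp hmem
      have hqsuf : q ∈ suf := by
        rcases List.mem_append.mp hq with hq' | hq'
        · have := hpre q hq'; omega
        · exact hq'
      obtain ⟨s1, s2, rfl⟩ := List.append_of_mem hqsuf
      -- s1 must be empty: its elements are both < level and ≥ level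
      have hs1 : s1 = [] := by
        cases s1 with
        | nil => rfl
        | cons r s1' =>
          exfalso
          have hPW' := hPW
          rw [List.pairwise_append] at hPW'
          have hrq : r.1 < q.1 :=
            (List.pairwise_append.mp hPW'.2.1).2.2 r (by simp) q (by simp)
          have := hsuf r (by simp)
          omega
      subst hs1
      simp only [List.nil_append] at hPW hsuf hpop ⊢
      have hs2 : ∀ r ∈ s2, level < r.1 := by
        intro r hr
        have hPW' := hPW
        rw [List.pairwise_append] at hPW'
        have := (List.pairwise_cons.mp hPW'.2.1).1 r hr
        omega
      have hdrop : ∀ a ∈ s2.map (fun p => if (p.1 == level) = true then (level, text) else p),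
          ¬ (decide (a.1 ≤ level) = true) := by
        intro a ha
        simp only [List.mem_map] at ha
        obtain ⟨r, hr, rfl⟩ := ha
        have := hs2 r hr
        have hne : ¬ r.1 = level := by omega
        simp only [hne, beq_iff_eq, if_false, decide_eq_true_eq]
        omega
      have hmp : pre.map (fun p => if (p.1 == level) = true then (level, text) else p) = pre := by
        calc pre.map (fun p => if (p.1 == level) = true then (level, text) else p)
            = pre.map id := List.map_congr_left (by
              intro a ha
              have := hpre a ha
              simp [show ¬ a.1 = level by omega])
          _ = pre := List.map_id pre
      rw [List.map_append, List.filter_append, hmp, List.filter_eq_self.mpr hkeep]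
      have hqrepl : (if (q.1 == level) = true then (level, text) else q) = (level, text) := by
        simp [hq1]
      simp only [List.map_cons, hqrepl, List.filter_cons]
      rw [if_pos (by simp), List.filter_eq_nil_iff.mpr hdrop]
    · -- `level` is a fresh key: it was appended, `suf` is filtered away
      rw [if_neg hc]
      have hnot : ∀ q ∈ suf, q.1 ≠ level := by
        intro q hq hqeq
        apply hc
        rw [PySem.Dict.contains_iff_mem_keys]
        have : level ∈ ((pre ++ suf).map (fun p => p.1)) :=
          List.mem_map.mpr ⟨q, List.mem_append.mpr (Or.inr hq), hqeq⟩
        simpa [PySem.Dict.keys, hitems] using this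
      rw [List.filter_append, List.filter_append,
        List.filter_eq_self.mpr hkeep,
        List.filter_eq_nil_iff.mpr (by
          intro a ha
          have h1 := hsuf a ha
          have h2 := hnot a ha
          simp only [decide_eq_true_eq, not_le]
          omega)]
      simp
  rw [hfilter]
  -- the re-inserting fold over fresh distinct keys just appends
  have hnodup : ((pre ++ [(level, text)]).map (fun p => p.1)).Nodup := by
    have : ((pre ++ [(level, text)]).map (fun p => p.1)).Pairwise (· < ·) :=
      List.pairwise_map.mpr hresPW
    exact this.imp ne_of_lt
  have := PySem.Dict.items_foldl_insert_fresh (l := pre ++ [(level, text)])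
      (d := PySem.Dict.empty) (k := fun p => p.1) (v := fun p => p.2)
      (by intro a _; exact PySem.Dict.contains_empty _) hnodup
  simpa using this

-- the whole loop: A's dict items always equal B's stack, which stays strictly increasing
lemma pvLoop (position : Int) (hs : List (Int × String × Int)) :
    ∀ st, pvInc st →
      (pvALoop position hs (PySem.Dict.mk st)).items = pvBLoop position hs st ∧
      pvInc (pvBLoop position hs st) := by
  induction hs with
  | nil => exact fun st h => ⟨rfl, h⟩
  | cons hd rest ih =>
    obtain ⟨level, text, hpos⟩ := hd
    intro st h
    by_cases hc : hpos ≤ position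
    · rw [pvALoop, pvBLoop, if_pos hc, if_neg (by omega : ¬ hpos > position)]
      obtain ⟨h2, h3⟩ := pvStep st level text h
      have hd' : (((PySem.Dict.mk st).insert level text).items.filter
            (fun p => decide (p.1 ≤ level))).foldl (fun d' p => d'.insert p.1 p.2)
            PySem.Dict.empty
          = PySem.Dict.mk (pvPopGE level st ++ [(level, text)]) :=
        PySem.Dict.ext (by rw [h2])
      rw [hd']
      exact ih _ h3
    · rw [pvALoop, pvBLoop, if_neg hc, if_pos (by omega : hpos > position)]
      exact ⟨rfl, h⟩

-- ===== VERDICT (by name: the statement is the Claim_ definition above) =====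
theorem get_parent_headers_spec : Claim_equal_get_parent_headers := by
  intro headers position _
  unfold Spec_get_parent_headers get_parent_headers_alt
  show (PySem.List.sorted (pvALoop position headers PySem.Dict.empty).keys (fun k => k) false).map
      (fun level => (pvALoop position headers PySem.Dict.empty).getD level "")
    = (pvBLoop position headers []).map (fun p => p.2)
  obtain ⟨heq, hinc⟩ := pvLoop position headers [] List.Pairwise.nil
  have hempty : (PySem.Dict.empty : PySem.Dict Int String) = PySem.Dict.mk [] := rfl
  rw [hempty]
  set d := pvALoop position headers (PySem.Dict.mk []) with hd
  set st := pvBLoop position headers [] with hst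
  have hkeys : d.keys = st.map (fun p => p.1) := by
    simp only [PySem.Dict.keys, heq]
  have hkeysPW : d.keys.Pairwise (· < ·) := by
    rw [hkeys]; exact List.pairwise_map.mpr hinc
  have hnd : d.keys.Nodup := hkeysPW.imp ne_of_lt
  have hs : PySem.List.sorted d.keys (fun k => k) false = d.keys :=
    PySem.List.sorted_eq_of_perm_of_pairwise_lt d.keys d.keys (fun k => k) (List.Perm.refl d.keys) hkeysPW
  rw [hs]
  have hv := PySem.Dict.values_eq_map_keys d hnd ""
  rw [← hv]
  simp only [PySem.Dict.values, heq]
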